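-- pv_equiv track=rewrite | github.com/Plann1ng/Mithril-Security-Skill-Assessment | task_1b/stock_predictions.py | optimal_plan
-- ===== SOURCE A (Python) =====
-- def optimal_plan(low_risk, high_risk):
--     # Lists must be the same lenght
--     n = len(low_risk)
--
--     # Optimal output
--     total = 0
--
--     # If the list is empty
--     if (n == 0):
--         return 0
--
--     # If the list lenght do not match
--     elif (len(low_risk) != len(high_risk)):
--         raise ValueError("High-risk and Low-risk lenght must be the same!")
--
--     # First week always low risk since there is no possible n-1
--     last_added = low_risk[0] # Last_added index so we can keep track and remove later if the upcoming week high risk is rewarding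
--     total += last_added
--
--     # Starting from the second week
--     for i in range(1, n):
--     # If current week high risk is better than low risk, remove the previously added number from total
--         if high_risk[i] > low_risk[i]:
--             total -= last_added
--             last_added = high_risk[i]
--             total += last_added
--     # If low risk is better, then just add
--         else:
--             last_added = low_risk[i]
--             total += last_added
--     return total
-- ===== SOURCE B (Python) =====
-- def optimal_plan(low_risk, high_risk):
--     n = len(low_risk)
--     if n == 0:
--         return 0
--     if n != len(high_risk):
--         raise ValueError("High-risk and Low-risk lenght must be the same!")
--     chosen = [low_risk[0]] + [
--         high_risk[i] if high_risk[i] > low_risk[i] else low_risk[i]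
--         for i in range(1, n)
--     ]
--     return sum(
--         chosen[i]
--         for i in range(n)
--         if i == n - 1 or not (high_risk[i + 1] > low_risk[i + 1])
--     )
-- ===== Notes on version B (the rewrite author's own statement) =====
-- stated objective: alternative
-- what changed: Replaces A's single running add-and-retract loop (total with last_added subtracted back when the next week's high-risk wins) by a two-pass formulation: build the chosen-value table once, then sum exactly the weeks whose following week does not trigger the high-risk branch.
import Mathlib
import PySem

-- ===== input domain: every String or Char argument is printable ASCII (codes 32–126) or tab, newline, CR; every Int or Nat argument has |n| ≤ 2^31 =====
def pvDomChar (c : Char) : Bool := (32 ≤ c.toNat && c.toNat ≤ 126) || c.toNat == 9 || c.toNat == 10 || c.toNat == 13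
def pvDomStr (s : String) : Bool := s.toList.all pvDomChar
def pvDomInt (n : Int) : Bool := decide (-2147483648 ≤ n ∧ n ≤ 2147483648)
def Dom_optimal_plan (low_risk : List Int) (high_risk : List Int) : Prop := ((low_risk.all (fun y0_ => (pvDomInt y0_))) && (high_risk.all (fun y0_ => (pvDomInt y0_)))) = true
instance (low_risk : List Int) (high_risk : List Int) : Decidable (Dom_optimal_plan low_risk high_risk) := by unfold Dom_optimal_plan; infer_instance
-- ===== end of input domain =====

-- B builds the chosen-value table once and returns a filtered sum (keep week i unless week i+1 triggers
-- the high-risk branch) instead of A's running add-and-retract loop; objective: alternative decomposition,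
-- same cost. Return-value equivalence only; neither program mutates its arguments.

-- ===== PORT A =====
-- literal transliteration of A: running total with last_added, subtracting it back when the next
-- high-risk value wins; the loop over range(1, n) becomes a foldl over pyRange with state (total, last_added)
def optimal_plan (low_risk : List Int) (high_risk : List Int) : Int :=
  let n : Int := low_risk.length
  if n = 0 then 0
  else
    let la : Int := PySem.List.pyGetD low_risk 0 0
    ((PySem.List.pyRange 1 n 1).foldl
      (fun (s : Int × Int) i =>
        if PySem.List.pyGetD high_risk i 0 > PySem.List.pyGetD low_risk i 0 then
          (s.1 - s.2 + PySem.List.pyGetD high_risk i 0, PySem.List.pyGetD high_risk i 0)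
        else
          (s.1 + PySem.List.pyGetD low_risk i 0, PySem.List.pyGetD low_risk i 0))
      (la, la)).1

-- ===== PORT B =====
-- literal transliteration of Source B: chosen = [low[0]] + [max-branch for i in 1..n-1];
-- then the filtered sum, as a foldl accumulating only the kept weeks
def optimal_plan_alt (low_risk : List Int) (high_risk : List Int) : Int :=
  let n : Int := low_risk.length
  if n = 0 then 0
  else
    let chosen : List Int :=
      PySem.List.pyGetD low_risk 0 0 ::
        (PySem.List.pyRange 1 n 1).map (fun i =>
          if PySem.List.pyGetD high_risk i 0 > PySem.List.pyGetD low_risk i 0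
          then PySem.List.pyGetD high_risk i 0 else PySem.List.pyGetD low_risk i 0)
    (PySem.List.pyRange 0 n 1).foldl
      (fun acc i =>
        if i = n - 1 ∨ ¬ (PySem.List.pyGetD high_risk (i + 1) 0 > PySem.List.pyGetD low_risk (i + 1) 0)
        then acc + PySem.List.pyGetD chosen i 0 else acc)
      0

-- ===== PRECONDITION & SPEC =====
-- Pre_ excludes exactly the inputs where A raises ValueError: nonempty low_risk with mismatched lengths.
def Pre_optimal_plan (low_risk : List Int) (high_risk : List Int) : Prop :=
  low_risk = [] ∨ low_risk.length = high_risk.length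
instance (low_risk : List Int) (high_risk : List Int) : Decidable (Pre_optimal_plan low_risk high_risk) := by unfold Pre_optimal_plan; infer_instance
def pvWitness_optimal_plan : List Int × List Int := ([3, 1, 5], [2, 4, 2])

def Spec_optimal_plan (low_risk : List Int) (high_risk : List Int) (out : Int) : Prop := out = optimal_plan_alt low_risk high_risk
instance (low_risk : List Int) (high_risk : List Int) (out : Int) : Decidable (Spec_optimal_plan low_risk high_risk out) := by unfold Spec_optimal_plan; infer_instance

-- ===== CLAIM (what is proved, stated in full; the proofs are below) =====
def Claim_equal_optimal_plan : Prop := ∀ (low_risk : List Int) (high_risk : List Int), Dom_optimal_plan low_risk high_risk → Pre_optimal_plan low_risk high_risk → Spec_optimal_plan low_risk high_risk (optimal_plan low_risk high_risk)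

-- ===== LEMMAS AND PROOFS =====

-- the value chosen for week i (low for week 0, the better branch afterwards)
def chF (low_risk high_risk : List Int) (i : Int) : Int :=
  if i = 0 then PySem.List.pyGetD low_risk 0 0
  else if PySem.List.pyGetD high_risk i 0 > PySem.List.pyGetD low_risk i 0
       then PySem.List.pyGetD high_risk i 0 else PySem.List.pyGetD low_risk i 0

-- sum of the chosen values of weeks 0..m-1 that survive (week i survives iff week i+1 does not trigger the high branch)
def keptSum (low_risk high_risk : List Int) (m : Int) : Int :=
  ((PySem.List.pyRange 0 m 1).map (fun i =>
    if PySem.List.pyGetD high_risk (i + 1) 0 > PySem.List.pyGetD low_risk (i + 1) 0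
    then 0 else chF low_risk high_risk i)).sum

lemma keptSum_succ (low high : List Int) (m : Nat) :
    keptSum low high ((m : Int) + 1)
      = keptSum low high m
        + (if PySem.List.pyGetD high ((m : Int) + 1) 0 > PySem.List.pyGetD low ((m : Int) + 1) 0
           then 0 else chF low high m) := by
  unfold keptSum
  rw [PySem.List.pyRange_one_succ_right (by positivity)]
  simp

-- A's loop invariant: after processing weeks 1..m-1, total = keptSum (m-1) + chosen (m-1), last_added = chosen (m-1)
lemma Aloop (low high : List Int) (m : Nat) (hm : 1 ≤ m) :
    (PySem.List.pyRange 1 (m : Int) 1).foldl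
      (fun (s : Int × Int) i =>
        if PySem.List.pyGetD high i 0 > PySem.List.pyGetD low i 0 then
          (s.1 - s.2 + PySem.List.pyGetD high i 0, PySem.List.pyGetD high i 0)
        else
          (s.1 + PySem.List.pyGetD low i 0, PySem.List.pyGetD low i 0))
      (PySem.List.pyGetD low 0 0, PySem.List.pyGetD low 0 0)
    = (keptSum low high ((m : Int) - 1) + chF low high ((m : Int) - 1),
       chF low high ((m : Int) - 1)) := by
  induction m with
  | zero => omega
  | succ k ih =>
    rcases Nat.eq_or_lt_of_le hm with h1 | h1
    · -- k + 1 = 1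
      have hk : k = 0 := by omega
      subst hk
      simp [keptSum, chF, PySem.List.pyRange]
    · -- k ≥ 1
      have hk : 1 ≤ k := by omega
      have hcast : ((k + 1 : Nat) : Int) = (k : Int) + 1 := by push_cast; ring
      rw [hcast, PySem.List.pyRange_one_succ_right (by exact_mod_cast hk),
          List.foldl_append, ih hk]
      have hk0 : (k : Int) ≠ 0 := by
        have : k ≠ 0 := by omega
        exact_mod_cast this
      have hks : (k : Int) + 1 - 1 = (k : Int) := by ring
      have hkm : (k : Int) - 1 + 1 = (k : Int) := by ring
      simp only [List.foldl_cons, List.foldl_nil, hks]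
      have hsum := keptSum_succ low high (k - 1)
      have hc : ((k - 1 : Nat) : Int) = (k : Int) - 1 := by
        push_cast [Nat.cast_sub hk]; ring
      rw [hc, hkm] at hsum
      rw [hsum]
      by_cases htr : PySem.List.pyGetD high (k : Int) 0 > PySem.List.pyGetD low (k : Int) 0
      · simp only [htr, if_true, chF, hk0, if_false, Prod.mk.injEq, gt_iff_lt]
        simp
      · simp only [htr, if_false, chF, hk0, gt_iff_lt]

-- pyGetD into B's chosen table is chF, for indices 0 ≤ i < n
lemma chosen_get (low high : List Int) (i : Int) (h0 : 0 ≤ i) (hn : i < (low.length : Int)) :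
    PySem.List.pyGetD
      (PySem.List.pyGetD low 0 0 ::
        (PySem.List.pyRange 1 (low.length : Int) 1).map (fun j =>
          if PySem.List.pyGetD high j 0 > PySem.List.pyGetD low j 0
          then PySem.List.pyGetD high j 0 else PySem.List.pyGetD low j 0))
      i 0 = chF low high i := by
  have hpos : (0 : Int) < (low.length : Int) := by omega
  have hmap :
      (PySem.List.pyRange 0 (low.length : Int) 1).map (chF low high)
        = PySem.List.pyGetD low 0 0 ::
            (PySem.List.pyRange 1 (low.length : Int) 1).map (fun j =>
              if PySem.List.pyGetD high j 0 > PySem.List.pyGetD low j 0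
              then PySem.List.pyGetD high j 0 else PySem.List.pyGetD low j 0) := by
    rw [PySem.List.pyRange_one_cons hpos]
    simp only [List.map_cons]
    refine congrArg₂ _ (by simp [chF]) ?_
    refine List.map_congr_left (fun j hj => ?_)
    have hj1 : (1 : Int) ≤ j := ((PySem.List.mem_pyRange_one).mp hj).1
    have : j ≠ 0 := by omega
    simp [chF, this]
  rw [← hmap, PySem.List.pyGetD_map_pyRange_of_nonneg _ _ _ _ h0 hn]

-- B unfolded: keptSum of weeks 0..n-2 plus the last chosen value
lemma Balt (low high : List Int) (hne : low ≠ []) :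
    optimal_plan_alt low high
      = keptSum low high ((low.length : Int) - 1) + chF low high ((low.length : Int) - 1) := by
  have hlen : 1 ≤ low.length := List.length_pos_of_ne_nil hne
  have hn0 : ((low.length : Int)) ≠ 0 := by
    simp only [ne_eq, Nat.cast_eq_zero]; omega
  unfold optimal_plan_alt
  simp only [hn0, if_false]
  set n : Int := (low.length : Int) with hn
  have h1n : (1 : Int) ≤ n := by omega
  rw [PySem.List.foldl_congr_mem _ _
    (fun acc i =>
      acc + (if (i = n - 1 ∨ ¬ (PySem.List.pyGetD high (i + 1) 0 > PySem.List.pyGetD low (i + 1) 0))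
             then chF low high i else 0)) _
    (by
      intro acc i hi
      have hb := (PySem.List.mem_pyRange_one).mp hi
      rw [chosen_get low high i hb.1 hb.2]
      dsimp only
      by_cases h : i = n - 1 ∨ ¬ (PySem.List.pyGetD high (i + 1) 0 > PySem.List.pyGetD low (i + 1) 0)
      · rw [if_pos h, if_pos h]
      · rw [if_neg h, if_neg h]; ring)]
  rw [PySem.List.foldl_add]
  rw [PySem.List.pyRange_one_append 0 (n - 1) n (by omega) (by omega)]
  have hlast : PySem.List.pyRange (n - 1) n 1 = [n - 1] := by
    have := PySem.List.pyRange_one_singleton (a := n - 1)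
    simpa [sub_add_cancel] using this
  rw [hlast, List.map_append, List.sum_append]
  have hpref :
      (PySem.List.pyRange 0 (n - 1) 1).map (fun i =>
        if (i = n - 1 ∨ ¬ (PySem.List.pyGetD high (i + 1) 0 > PySem.List.pyGetD low (i + 1) 0))
        then chF low high i else 0)
        = (PySem.List.pyRange 0 (n - 1) 1).map (fun i =>
            if PySem.List.pyGetD high (i + 1) 0 > PySem.List.pyGetD low (i + 1) 0
            then 0 else chF low high i) := by
    refine List.map_congr_left (fun i hi => ?_)
    have hb := (PySem.List.mem_pyRange_one).mp hi
    have hne' : i ≠ n - 1 := by omega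
    by_cases htr : PySem.List.pyGetD high (i + 1) 0 > PySem.List.pyGetD low (i + 1) 0
    · simp [htr, hne']
    · simp [htr, hne']
  rw [hpref]
  simp [keptSum]

-- ===== VERDICT (by name: the statement is the Claim_ definition above) =====
theorem optimal_plan_spec : Claim_equal_optimal_plan := by
  intro low high _ _
  unfold Spec_optimal_plan
  by_cases hne : low = []
  · subst hne
    simp [optimal_plan, optimal_plan_alt]
  · have hlen : 1 ≤ low.length := List.length_pos_of_ne_nil hne
    have hn0 : ((low.length : Int)) ≠ 0 := by
      simp only [ne_eq, Nat.cast_eq_zero]; omega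
    rw [Balt low high hne]
    unfold optimal_plan
    simp only [hn0, if_false]
    rw [Aloop low high low.length hlen]
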